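-- pv_equiv track=rewrite | github.com/konopleva-karina/python_2_term | src/game.py | count_of_remaining_figures
-- ===== SOURCE A (Python) =====
-- class FigureType:
--     empty = 0
--     white_pawn = 1
--     white_king = 2
--     black_pawn = 3
--     black_king = 4
--
-- def count_of_remaining_figures(board_size, my_board):
--     computers_figures_count = 0
--     players_figures_count = 0
--
--     for i in range(board_size):
--         for j in range(board_size):
--             if my_board[j][i] == FigureType.white_pawn:
--                 players_figures_count += 1
--             elif my_board[j][i] == FigureType.white_king:
--                 players_figures_count += 2
--             elif my_board[j][i] == FigureType.black_pawn:
--                 computers_figures_count += 1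
--             elif my_board[j][i] == FigureType.black_king:
--                 computers_figures_count += 3
--     return computers_figures_count, players_figures_count
-- ===== SOURCE B (Python) =====
-- def count_of_remaining_figures(board_size, my_board):
--     # Flatten the visited board_size x board_size region row-by-row with slices,
--     # then combine four .count() passes with the figure weights in closed form.
--     cells = []
--     for j in range(board_size):
--         cells.extend(my_board[j][:board_size])
--     return (cells.count(3) + 3 * cells.count(4),
--             cells.count(1) + 2 * cells.count(2))
-- ===== Notes on version B (the rewrite author's own statement) =====
-- stated objective: alternative
-- what changed: B replaces A's column-major nested index loop with branchy weighted accumulators by a staged decomposition: flatten the visited square row-by-row using list slices, then compute both totals in closed form from four list.count() passes.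
import Mathlib
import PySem

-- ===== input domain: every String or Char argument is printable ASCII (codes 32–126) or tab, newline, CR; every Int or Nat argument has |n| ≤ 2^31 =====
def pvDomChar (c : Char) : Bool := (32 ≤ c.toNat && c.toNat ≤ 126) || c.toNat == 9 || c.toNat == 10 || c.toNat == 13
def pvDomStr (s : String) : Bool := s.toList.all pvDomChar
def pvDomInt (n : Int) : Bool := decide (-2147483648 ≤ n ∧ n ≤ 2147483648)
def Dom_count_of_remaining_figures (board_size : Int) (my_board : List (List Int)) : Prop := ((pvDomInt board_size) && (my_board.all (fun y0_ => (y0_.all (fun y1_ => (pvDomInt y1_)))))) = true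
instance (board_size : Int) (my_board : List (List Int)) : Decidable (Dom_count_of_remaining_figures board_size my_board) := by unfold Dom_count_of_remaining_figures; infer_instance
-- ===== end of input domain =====

-- B flattens the visited square row-by-row with slices and combines four .count() passes
-- with the figure weights in closed form; same O(n^2) cost, different decomposition ("alternative").

-- ===== PORT A =====
-- literal transliteration: nested range loops (i outer, j inner), branch-per-figure with weighted counters
def count_of_remaining_figures (board_size : Int) (my_board : List (List Int)) : Int × Int :=
  (PySem.List.pyRange 0 board_size 1).foldl (fun acc i =>
    (PySem.List.pyRange 0 board_size 1).foldl (fun acc j =>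
      if PySem.List.pyGetD (PySem.List.pyGetD my_board j []) i 0 = 1 then (acc.1, acc.2 + 1)
      else if PySem.List.pyGetD (PySem.List.pyGetD my_board j []) i 0 = 2 then (acc.1, acc.2 + 2)
      else if PySem.List.pyGetD (PySem.List.pyGetD my_board j []) i 0 = 3 then (acc.1 + 1, acc.2)
      else if PySem.List.pyGetD (PySem.List.pyGetD my_board j []) i 0 = 4 then (acc.1 + 3, acc.2)
      else acc) acc) (0, 0)

-- ===== PORT B =====
-- literal transliteration of Source B: flatten the region row-by-row via slices, then four counts
def count_of_remaining_figures_alt (board_size : Int) (my_board : List (List Int)) : Int × Int :=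
  let cells := (PySem.List.pyRange 0 board_size 1).foldl
    (fun acc j => acc ++ PySem.List.slice (PySem.List.pyGetD my_board j []) none (some board_size)) []
  ((cells.count 3 : Int) + 3 * (cells.count 4 : Int),
   (cells.count 1 : Int) + 2 * (cells.count 2 : Int))

-- ===== PRECONDITION & SPEC =====
-- Pre_ excludes exactly the boards on which A raises IndexError (fewer than board_size rows,
-- or one of the first board_size rows shorter than board_size).
def Pre_count_of_remaining_figures (board_size : Int) (my_board : List (List Int)) : Prop :=
  board_size ≤ (my_board.length : Int) ∧
  ∀ row ∈ my_board.take board_size.toNat, board_size ≤ (row.length : Int)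
instance (board_size : Int) (my_board : List (List Int)) : Decidable (Pre_count_of_remaining_figures board_size my_board) := by unfold Pre_count_of_remaining_figures; infer_instance

def pvWitness_count_of_remaining_figures : Int × List (List Int) := (2, [[1, 3], [2, 4]])


def Spec_count_of_remaining_figures (board_size : Int) (my_board : List (List Int)) (out : Int × Int) : Prop := out = count_of_remaining_figures_alt board_size my_board
instance (board_size : Int) (my_board : List (List Int)) (out : Int × Int) : Decidable (Spec_count_of_remaining_figures board_size my_board out) := by unfold Spec_count_of_remaining_figures; infer_instance

-- ===== CLAIM (what is proved, stated in full; the proofs are below) =====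
def Claim_equal_count_of_remaining_figures : Prop := ∀ (board_size : Int) (my_board : List (List Int)), Dom_count_of_remaining_figures board_size my_board → Pre_count_of_remaining_figures board_size my_board → Spec_count_of_remaining_figures board_size my_board (count_of_remaining_figures board_size my_board)


-- ===== LEMMAS AND PROOFS =====

-- A's weighted-branch step, named for the lemmas
def pvStepA (acc : Int × Int) (v : Int) : Int × Int :=
  if v = 1 then (acc.1, acc.2 + 1)
  else if v = 2 then (acc.1, acc.2 + 2)
  else if v = 3 then (acc.1 + 1, acc.2)
  else if v = 4 then (acc.1 + 3, acc.2)
  else acc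

-- a nested fold over two index lists is a fold over the flattened cell list
theorem pv_foldl_nested {α β γ σ : Type} (xs : List α) (ys : List β)
    (cell : α → β → γ) (f : σ → γ → σ) (init : σ) :
    xs.foldl (fun acc x => ys.foldl (fun a y => f a (cell x y)) acc) init
      = (xs.flatMap (fun x => ys.map (cell x))).foldl f init := by
  induction xs generalizing init with
  | nil => simp
  | cons x xs ih => simp [List.foldl_append, List.foldl_map, ih]

-- A's fold computes the weighted counts in closed form
theorem pvStepA_foldl (vs : List Int) (c p : Int) :
    vs.foldl pvStepA (c, p)
      = (c + vs.count 3 + 3 * vs.count 4, p + vs.count 1 + 2 * vs.count 2) := by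
  induction vs generalizing c p with
  | nil => simp
  | cons v vs ih =>
    simp only [List.foldl_cons, List.count_cons, pvStepA]
    split_ifs <;> simp_all <;> ring

-- counting a column prepended across a flatMap splits off the map of the heads
theorem pv_count_flatMap_cons (x : Int) (g : Int → Int) (h : Int → List Int) (ys : List Int) :
    ((ys.flatMap fun b => g b :: h b).count x)
      = (ys.map g).count x + (ys.flatMap h).count x := by
  induction ys with
  | nil => simp
  | cons y ys ih => simp [List.count_cons, List.count_append, ih]; omega

-- the transpose swap: counting the region column-major equals counting it row-major
theorem pv_count_swap (x : Int) (xs ys : List Int) (f : Int → Int → Int) :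
    ((xs.flatMap fun a => ys.map (f a)).count x)
      = ((ys.flatMap fun b => xs.map (fun a => f a b)).count x) := by
  induction xs with
  | nil => simp [List.count_flatMap, Function.comp_def]
  | cons a xs ih =>
    simp only [List.flatMap_cons, List.count_append, List.map_cons, ih]
    rw [pv_count_flatMap_cons x (f a) (fun b => xs.map (fun a => f a b)) ys]

-- take n of a long-enough list, written as a map over range
theorem pv_take_eq_map_range (l : List Int) (n : Nat) (hn : n ≤ l.length) :
    l.take n = (List.range n).map (fun k => l.getD k 0) := by
  apply List.ext_getElem
  · simp [Nat.min_eq_left hn]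
  · intro i h1 h2
    have hi : i < n := by simpa using h2
    simp only [List.getElem_take, List.getElem_map, List.getElem_range]
    rw [List.getD_eq_getElem l 0 (by omega)]

theorem pv_ports_eq (board_size : Int) (my_board : List (List Int))
    (hpre : Pre_count_of_remaining_figures board_size my_board) :
    count_of_remaining_figures board_size my_board
      = count_of_remaining_figures_alt board_size my_board := by
  by_cases hbs : 0 ≤ board_size
  case neg =>
    have hR : PySem.List.pyRange 0 board_size 1 = [] := by
      apply List.eq_nil_iff_forall_not_mem.mpr
      intro x hx
      rw [PySem.List.mem_pyRange_one] at hx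
      omega
    simp [count_of_remaining_figures, count_of_remaining_figures_alt, hR]
  case pos =>
  obtain ⟨hlen, hrows⟩ := hpre
  set g : Int → Int → Int :=
    fun i j => PySem.List.pyGetD (PySem.List.pyGetD my_board j []) i 0 with hg
  -- A as a fold over the column-major cell list
  have hA : count_of_remaining_figures board_size my_board
      = ((PySem.List.pyRange 0 board_size 1).flatMap
          (fun i => (PySem.List.pyRange 0 board_size 1).map (g i))).foldl pvStepA (0, 0) :=
    pv_foldl_nested _ _ g pvStepA (0, 0)
  -- B's cell list is the row-major flatMap
  have hB0 : count_of_remaining_figures_alt board_size my_board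
      = (fun cells : List Int =>
          ((cells.count 3 : Int) + 3 * (cells.count 4 : Int),
           (cells.count 1 : Int) + 2 * (cells.count 2 : Int)))
        ((PySem.List.pyRange 0 board_size 1).flatMap
          (fun j => PySem.List.slice (PySem.List.pyGetD my_board j []) none (some board_size))) := by
    simp only [count_of_remaining_figures_alt, PySem.List.foldl_append_eq_flatMap, List.nil_append]
  -- each visited slice is the map over the row indices
  have hslice : ∀ j ∈ PySem.List.pyRange 0 board_size 1,
      PySem.List.slice (PySem.List.pyGetD my_board j []) none (some board_size)
        = (PySem.List.pyRange 0 board_size 1).map (fun i => g i j) := by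
    intro j hj
    rw [PySem.List.mem_pyRange_one] at hj
    have hrow : PySem.List.pyGetD my_board j [] = my_board.getD j.toNat [] :=
      PySem.List.pyGetD_of_nonneg my_board [] hj.1
    have hjlt : j.toNat < my_board.length := by omega
    have hmem : my_board.getD j.toNat [] ∈ my_board.take board_size.toNat := by
      rw [List.getD_eq_getElem my_board [] hjlt]
      exact List.mem_take_iff_getElem.mpr ⟨j.toNat, by omega, by simp⟩
    have hrlen : board_size ≤ ((my_board.getD j.toNat []).length : Int) := hrows _ hmem
    rw [hrow, PySem.List.slice_to _ hbs,
        pv_take_eq_map_range _ board_size.toNat (by omega)]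
    have hn : board_size = (board_size.toNat : Int) := by omega
    rw [hn, PySem.List.pyRange_zero_natCast, List.map_map]
    apply List.map_congr_left
    intro k _
    simp [hg, PySem.List.pyGetD_natCast, hrow]
  have hB : count_of_remaining_figures_alt board_size my_board
      = (fun cells : List Int =>
          ((cells.count 3 : Int) + 3 * (cells.count 4 : Int),
           (cells.count 1 : Int) + 2 * (cells.count 2 : Int)))
        ((PySem.List.pyRange 0 board_size 1).flatMap
          (fun j => (PySem.List.pyRange 0 board_size 1).map (fun i => g i j))) := by
    rw [hB0]
    congr 1
    simp only [List.flatMap]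
    exact congrArg List.flatten (List.map_congr_left hslice)
  rw [hA, hB, pvStepA_foldl]
  simp only [pv_count_swap _ (PySem.List.pyRange 0 board_size 1) (PySem.List.pyRange 0 board_size 1) g]
  ring_nf

-- ===== VERDICT (by name: the statements are the Claim_ definitions above) =====
theorem count_of_remaining_figures_spec : Claim_equal_count_of_remaining_figures := by
  intro board_size my_board _ hpre
  exact pv_ports_eq board_size my_board hpre
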